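-- pv_equiv track=rewrite | github.com/guitargeek/geeksw | geeksw.py | get_dependency_graph
-- ===== SOURCE A (Python) =====
-- def get_dependency_graph(producer_infos):
--     requires_dict = {}
--     for name, info in producer_infos.items():
--         for req in info["requires"]:
--             if req not in requires_dict:
--                 requires_dict[req] = []
--             requires_dict[req] += [name]
--
--     graph = {}
--     for name, info in producer_infos.items():
--         graph[name] = []
--         for prod in info["produces"]:
--             if not prod in requires_dict: continue
--             for other in requires_dict[prod]:
--                 graph[name] += [other]
--
--     return graph
-- ===== SOURCE B (Python) =====
-- def get_dependency_graph(producer_infos):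
--     graph = {}
--     for name, info in producer_infos.items():
--         deps = []
--         for prod in info["produces"]:
--             for other, other_info in producer_infos.items():
--                 for req in other_info["requires"]:
--                     if req == prod:
--                         deps.append(other)
--         graph[name] = deps
--     return graph
-- ===== Notes on version B (the rewrite author's own statement) =====
-- stated objective: simpler
-- what changed: B drops A's inverted requires_dict index entirely and instead, for each produced item, rescans all producers' requires lists directly, collecting each name per matching occurrence in the same order; Pre_ excludes infos missing a 'requires'/'produces' key (A raises KeyError) and assoc lists with duplicate keys, which cannot arise from a Python dict.
import Mathlib
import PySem

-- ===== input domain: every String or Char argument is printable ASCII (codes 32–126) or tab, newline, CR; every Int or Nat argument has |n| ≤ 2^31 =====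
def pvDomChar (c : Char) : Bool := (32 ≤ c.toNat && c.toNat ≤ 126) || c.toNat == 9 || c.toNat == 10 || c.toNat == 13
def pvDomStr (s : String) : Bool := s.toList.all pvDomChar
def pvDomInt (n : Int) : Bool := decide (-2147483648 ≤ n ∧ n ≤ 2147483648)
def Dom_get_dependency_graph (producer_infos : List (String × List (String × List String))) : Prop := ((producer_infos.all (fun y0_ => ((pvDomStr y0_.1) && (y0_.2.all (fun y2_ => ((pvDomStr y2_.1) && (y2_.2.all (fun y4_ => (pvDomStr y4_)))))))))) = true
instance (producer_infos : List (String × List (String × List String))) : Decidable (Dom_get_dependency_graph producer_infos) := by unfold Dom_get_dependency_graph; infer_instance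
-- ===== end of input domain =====

-- B replaces A's inverted requires_dict index by a direct rescan of all producers' requires
-- lists for each produced item (simpler, no index; not faster).

-- shared accessors: info["requires"] / info["produces"] (first-match dict lookup; Pre_ guarantees the key is present)
def pvReq (info : List (String × List String)) : List String := (PySem.Dict.mk info).getD "requires" []
def pvProd (info : List (String × List String)) : List String := (PySem.Dict.mk info).getD "produces" []

-- ===== PORT A =====
-- phase 1 of A: the inverted index  req -> [names that require it]
def pvRequiresDict (producer_infos : List (String × List (String × List String))) : PySem.Dict String (List String) :=
  producer_infos.foldl
    (fun rd p => (pvReq p.2).foldl (fun rd req => rd.modify req [] (· ++ [p.1])) rd)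
    PySem.Dict.empty

def get_dependency_graph (producer_infos : List (String × List (String × List String))) : List (String × List String) :=
  let requires_dict := pvRequiresDict producer_infos
  (producer_infos.foldl
    (fun g p =>
      (pvProd p.2).foldl
        (fun g prod =>
          match requires_dict.get? prod with
          | none => g                                       -- 'if not prod in requires_dict: continue'
          | some others => others.foldl (fun g other => g.modify p.1 [] (· ++ [other])) g)
        (g.insert p.1 []))
    PySem.Dict.empty).items

-- ===== PORT B =====
def get_dependency_graph_alt (producer_infos : List (String × List (String × List String))) : List (String × List String) :=
  (producer_infos.foldl
    (fun g p =>
      let deps :=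
        (pvProd p.2).foldl
          (fun deps prod =>
            producer_infos.foldl
              (fun deps q =>
                (pvReq q.2).foldl
                  (fun deps req => if req == prod then deps ++ [q.1] else deps)
                  deps)
              deps)
          []
      g.insert p.1 deps)
    PySem.Dict.empty).items

-- ===== PRECONDITION & SPEC =====
-- Pre_ excludes infos missing a "requires" or "produces" key (there Python A raises KeyError) and
-- association lists with duplicate dict keys, which cannot arise from a Python dict argument.
def Pre_get_dependency_graph (producer_infos : List (String × List (String × List String))) : Prop :=
  (producer_infos.map Prod.fst).Nodup ∧
  ∀ p ∈ producer_infos,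
    (p.2.map Prod.fst).Nodup ∧ "requires" ∈ p.2.map Prod.fst ∧ "produces" ∈ p.2.map Prod.fst
instance (producer_infos : List (String × List (String × List String))) : Decidable (Pre_get_dependency_graph producer_infos) := by unfold Pre_get_dependency_graph; infer_instance

def pvWitness_get_dependency_graph : (List (String × List (String × List String))) :=
  [("p1", [("requires", ["x"]), ("produces", ["y"])]),
   ("p2", [("requires", ["y"]), ("produces", ["z"])])]

def Spec_get_dependency_graph (producer_infos : List (String × List (String × List String))) (out : List (String × List String)) : Prop := out = get_dependency_graph_alt producer_infos
instance (producer_infos : List (String × List (String × List String))) (out : List (String × List String)) : Decidable (Spec_get_dependency_graph producer_infos out) := by unfold Spec_get_dependency_graph; infer_instance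

-- ===== CLAIM (what is proved, stated in full; the proofs are below) =====
def Claim_equal_get_dependency_graph : Prop := ∀ (producer_infos : List (String × List (String × List String))), Dom_get_dependency_graph producer_infos → Pre_get_dependency_graph producer_infos → Spec_get_dependency_graph producer_infos (get_dependency_graph producer_infos)

-- ===== LEMMAS AND PROOFS =====

-- B's per-prod scan of all producers, written as a flatMap
def pvCollect (producer_infos : List (String × List (String × List String))) (c : String) : List String :=
  producer_infos.flatMap (fun q => ((pvReq q.2).filter (fun r => r == c)).map (fun _ => q.1))

-- appending one element at a time to d[k] through modify, starting from an insert at k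
theorem pv_foldl_modify_insert (k : String) (os : List String) :
    ∀ (g : PySem.Dict String (List String)) (v : List String),
      os.foldl (fun g o => g.modify k [] (· ++ [o])) (g.insert k v) = g.insert k (v ++ os) := by
  induction os with
  | nil => intro g v; simp
  | cons o os ih =>
    intro g v
    have h : (g.insert k v).modify k [] (· ++ [o]) = g.insert k (v ++ [o]) := by
      simp [PySem.Dict.modify, PySem.Dict.getD_insert_self, PySem.Dict.insert_insert_self]
    simp only [List.foldl_cons, h, ih]
    simp

-- A's inner requires loop, lookup-characterised
theorem pv_getD_modify_scan (nm : String) (l : List String) :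
    ∀ (d : PySem.Dict String (List String)) (c : String),
      (l.foldl (fun d r => d.modify r [] (· ++ [nm])) d).getD c []
        = d.getD c [] ++ (l.filter (fun r => r == c)).map (fun _ => nm) := by
  induction l with
  | nil => intro d c; simp
  | cons r l ih =>
    intro d c
    simp only [List.foldl_cons, ih, List.filter_cons]
    by_cases h : r = c
    · subst h
      rw [PySem.Dict.getD_modify, if_pos rfl]
      simp
    · have h' : (r == c) = false := by simp [h]
      rw [PySem.Dict.getD_modify, if_neg (Ne.symm h)]
      simp [h']

-- phase 1 of A equals B's rescan: the inverted index looked up at c is the direct scan for c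
theorem pv_requiresDict_getD (producer_infos : List (String × List (String × List String))) (c : String) :
    (pvRequiresDict producer_infos).getD c [] = pvCollect producer_infos c := by
  suffices h : ∀ (d : PySem.Dict String (List String)),
      (producer_infos.foldl
        (fun rd p => (pvReq p.2).foldl (fun rd req => rd.modify req [] (· ++ [p.1])) rd) d).getD c []
      = d.getD c [] ++ pvCollect producer_infos c by
    simpa [pvRequiresDict] using h PySem.Dict.empty
  induction producer_infos with
  | nil => intro d; simp [pvCollect]
  | cons p rest ih =>
    intro d
    simp only [List.foldl_cons, ih, pv_getD_modify_scan, pvCollect, List.flatMap_cons,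
      List.append_assoc]

-- A's per-producer produces loop, starting from graph[name] = []
theorem pv_matchfold (rd : PySem.Dict String (List String)) (k : String)
    (prods : List String) :
    ∀ (g : PySem.Dict String (List String)) (v : List String),
      prods.foldl
        (fun g prod =>
          match rd.get? prod with
          | none => g
          | some others => others.foldl (fun g other => g.modify k [] (· ++ [other])) g)
        (g.insert k v)
      = g.insert k (v ++ prods.flatMap (fun prod => rd.getD prod [])) := by
  induction prods with
  | nil => intro g v; simp
  | cons prod rest ih =>
    intro g v
    simp only [List.foldl_cons, List.flatMap_cons]
    cases h : rd.get? prod with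
    | none =>
      have hd : rd.getD prod [] = [] := by simp [PySem.Dict.getD_eq_get?_getD, h]
      simpa [hd] using ih g v
    | some os =>
      have hd : rd.getD prod [] = os := by simp [PySem.Dict.getD_eq_get?_getD, h]
      show rest.foldl _ ((os.foldl (fun g o => g.modify k [] (· ++ [o])) (g.insert k v))) = _
      rw [pv_foldl_modify_insert, ih, hd, List.append_assoc]

-- B's triple loop for one prod appends exactly the scan result
theorem pv_scan_one (producer_infos : List (String × List (String × List String))) (prod : String) :
    ∀ (deps : List String),
      producer_infos.foldl
        (fun deps q =>
          (pvReq q.2).foldl (fun deps req => if req == prod then deps ++ [q.1] else deps) deps)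
        deps
      = deps ++ pvCollect producer_infos prod := by
  induction producer_infos with
  | nil => intro deps; simp [pvCollect]
  | cons q rest ih =>
    intro deps
    simp only [List.foldl_cons, PySem.List.foldl_append_if (fun r => r == prod) (fun _ => q.1),
      ih, pvCollect, List.flatMap_cons, List.append_assoc]

-- ===== VERDICT (by name: the statement is the Claim_ definition above) =====
theorem get_dependency_graph_spec : Claim_equal_get_dependency_graph := by
  intro producer_infos _ _
  unfold Spec_get_dependency_graph get_dependency_graph get_dependency_graph_alt
  have hstep : ∀ (g : PySem.Dict String (List String)) (p : String × List (String × List String)),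
      (pvProd p.2).foldl
        (fun g prod =>
          match (pvRequiresDict producer_infos).get? prod with
          | none => g
          | some others => others.foldl (fun g other => g.modify p.1 [] (· ++ [other])) g)
        (g.insert p.1 [])
      = g.insert p.1
          ((pvProd p.2).foldl
            (fun deps prod =>
              producer_infos.foldl
                (fun deps q =>
                  (pvReq q.2).foldl (fun deps req => if req == prod then deps ++ [q.1] else deps)
                    deps)
                deps)
            []) := by
    intro g p
    rw [pv_matchfold]
    congr 1
    simp only [pv_scan_one, PySem.List.foldl_append_eq_flatMap, List.nil_append]
    exact congrArg (fun f => List.flatMap f (pvProd p.2)) (funext fun prod => pv_requiresDict_getD producer_infos prod)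
  simp only [hstep]
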